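-- pv_equiv track=rewrite | github.com/tadhg-ohiggins/advent-of-code | 2021/python/day-10.py | score_stack
-- ===== SOURCE A (Python) =====
-- def score_stack(stack):
--     scores = {
--         ")": 1,
--         "]": 2,
--         "}": 3,
--         ">": 4,
--     }
--     score = 0
--     for char in stack:
--         score = score * 5
--         score = score + scores[char]
--     return score
-- ===== SOURCE B (Python) =====
-- def score_stack(stack):
--     scores = {
--         ")": 1,
--         "]": 2,
--         "}": 3,
--         ">": 4,
--     }
--
--     def go(chars):
--         if not chars:
--             return 0
--         head, *rest = chars
--         return scores[head] * 5 ** len(rest) + go(rest)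
--
--     return go(list(stack))
-- ===== Notes on version B (the rewrite author's own statement) =====
-- stated objective: alternative
-- what changed: Replaces the iterative Horner accumulation (score = score*5 + v) with a structural recursion that computes each character's positional value scores[c] * 5**len(rest) directly and sums them.
import Mathlib
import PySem

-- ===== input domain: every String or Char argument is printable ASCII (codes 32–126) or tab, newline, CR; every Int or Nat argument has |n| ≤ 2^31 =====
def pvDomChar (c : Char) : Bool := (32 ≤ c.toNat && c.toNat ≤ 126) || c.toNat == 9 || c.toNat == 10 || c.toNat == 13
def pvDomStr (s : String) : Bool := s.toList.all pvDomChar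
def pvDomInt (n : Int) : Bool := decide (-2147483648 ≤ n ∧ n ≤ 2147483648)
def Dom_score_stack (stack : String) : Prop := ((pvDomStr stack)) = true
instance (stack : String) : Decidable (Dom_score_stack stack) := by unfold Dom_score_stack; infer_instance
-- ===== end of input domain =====

-- B replaces Horner's iterative accumulation with a structural recursion summing explicit positional values scores[c] * 5^len(rest) (alternative decomposition; not faster).


-- ===== PORT A =====
-- A's scores dict; a character outside it is a KeyError, excluded by Pre_score_stack,
-- so the .getD 0 default is never reached on admitted inputs
def scoresA : PySem.Dict Char Int :=
  PySem.Dict.ofList [(')', 1), (']', 2), ('}', 3), ('>', 4)]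

def score_stack (stack : String) : Int :=
  stack.toList.foldl (fun score c => score * 5 + (PySem.Dict.get? scoresA c).getD 0) 0

-- ===== PORT B =====
def scoresB : PySem.Dict Char Int :=
  PySem.Dict.ofList [(')', 1), (']', 2), ('}', 3), ('>', 4)]

-- B's recursive helper `go`: positional value of the head plus the score of the rest
def goB : List Char → Int
  | [] => 0
  | head :: rest => (PySem.Dict.get? scoresB head).getD 0 * 5 ^ rest.length + goB rest

def score_stack_alt (stack : String) : Int := goB stack.toList

-- ===== PRECONDITION & SPEC =====
-- Pre_ excludes stacks containing a character outside ")]}>", on which A (and B) raise KeyError.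
def Pre_score_stack (stack : String) : Prop :=
  stack.toList.all (fun c => c = ')' ∨ c = ']' ∨ c = '}' ∨ c = '>')
instance (stack : String) : Decidable (Pre_score_stack stack) := by unfold Pre_score_stack; infer_instance
def pvWitness_score_stack : String := ")]}>"

def Spec_score_stack (stack : String) (out : Int) : Prop := out = score_stack_alt stack
instance (stack : String) (out : Int) : Decidable (Spec_score_stack stack out) := by unfold Spec_score_stack; infer_instance

-- ===== CLAIM (what is proved, stated in full; the proofs are below) =====
def Claim_equal_score_stack : Prop := ∀ (stack : String), Dom_score_stack stack → Pre_score_stack stack → Spec_score_stack stack (score_stack stack)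

-- ===== LEMMAS AND PROOFS =====
theorem scores_eq : scoresB = scoresA := rfl

-- Horner's fold from accumulator s equals s shifted by 5^len plus B's positional sum
theorem foldA_eq_goB (l : List Char) : ∀ (s : Int),
    l.foldl (fun score c => score * 5 + (PySem.Dict.get? scoresA c).getD 0) s
      = s * 5 ^ l.length + goB l := by
  induction l with
  | nil => intro s; simp [goB]
  | cons c cs ih =>
    intro s
    simp only [List.foldl_cons, goB, List.length_cons, scores_eq]
    rw [ih]
    ring

-- ===== VERDICT (by name: the statement is the Claim_ definition above) =====
theorem score_stack_spec : Claim_equal_score_stack := by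
  intro stack _ _
  unfold Spec_score_stack score_stack score_stack_alt
  rw [foldA_eq_goB]
  simp
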